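-- pv_equiv track=rewrite | github.com/sudowork/AIND-Sudoku | constraints.py | get_only_choices_for_unit
-- ===== SOURCE A (Python) =====
-- from collections import Counter
--
-- def get_only_choices_for_unit(values, unit):
--     """Returns a list of (box, value) tuples that are valid only choices for a unit.
--
--     Args:
--         values: Sudoku in dictionary form.
--     Returns:
--         List of (box, value) tuples that are only choices.
--     """
--     possibility_counts = Counter()
--     # Maintain an index of value -> box
--     # Since we only care about only choices, allow the box to be overwritten
--     # Only choices will inherently not be overwritten.
--     value_to_box = dict()
--     # Count appearances of values and create index of value -> last box
--     for box in unit: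
--         box_values = list(values[box])
--         possibility_counts.update(box_values)
--         for value in box_values:
--             existing_values = value_to_box[value] = box
--     return [
--         (value_to_box[value], value)
--         for value, count in possibility_counts.items()
--         if count == 1
--     ]
-- ===== SOURCE B (Python) =====
-- def get_only_choices_for_unit(values, unit):
--     """Returns a list of (box, value) tuples that are valid only choices for a unit."""
--     # Distinct candidate values in first-appearance order across the unit.
--     order = []
--     seen = set()
--     for box in unit:
--         for v in values[box]:
--             if v not in seen:
--                 seen.add(v)
--                 order.append(v)
--     # For each candidate, scan the unit: total occurrences and the boxes containing it.
--     result = []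
--     for v in order:
--         total = 0
--         hits = []
--         for box in unit:
--             k = values[box].count(v)
--             if k:
--                 total += k
--                 hits.append(box)
--         if total == 1:
--             result.append((hits[0], v))
--     return result
-- ===== Notes on version B (the rewrite author's own statement) =====
-- stated objective: alternative
-- what changed: A makes one counting pass with a Counter and a value->last-box index; B first collects the distinct candidate values in first-appearance order with a seen-set, then for each value rescans the unit counting its occurrences and collecting the boxes that contain it, emitting (first hit box, value) when the total is 1.
import Mathlib
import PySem

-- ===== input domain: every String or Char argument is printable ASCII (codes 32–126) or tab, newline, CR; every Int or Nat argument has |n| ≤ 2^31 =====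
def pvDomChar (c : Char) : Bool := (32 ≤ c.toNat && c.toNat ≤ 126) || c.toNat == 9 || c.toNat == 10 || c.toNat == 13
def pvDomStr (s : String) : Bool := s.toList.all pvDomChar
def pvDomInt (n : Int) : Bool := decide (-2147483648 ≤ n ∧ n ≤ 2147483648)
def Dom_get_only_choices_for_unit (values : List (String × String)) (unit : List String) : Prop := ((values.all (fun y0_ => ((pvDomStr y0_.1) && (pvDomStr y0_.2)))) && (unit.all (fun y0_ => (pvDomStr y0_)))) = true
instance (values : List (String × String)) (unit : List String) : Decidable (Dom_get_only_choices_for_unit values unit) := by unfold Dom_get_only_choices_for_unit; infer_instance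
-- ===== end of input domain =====

-- B replaces A's single Counter-and-index pass by a first-appearance scan for the
-- distinct candidate values followed by a per-value rescan of the unit (alternative
-- decomposition; not claimed faster). Pre_ excludes units with a box missing from
-- values, where Python A raises KeyError.


-- ===== PORT A =====
-- Counter / value_to_box keys are Python 1-character strings; they are carried as Char
-- and rendered back to 1-character Lean Strings in the output, which is exact.
def get_only_choices_for_unit (values : List (String × String)) (unit : List String) : List (String × String) :=
  let st := unit.foldl
    (fun (st : PySem.Dict Char Int × PySem.Dict Char String) box =>
      let box_values := (((PySem.Dict.mk values).get? box).getD "").toList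
      (box_values.foldl (fun d v => d.modify v 0 (fun n => n + 1)) st.1,
       box_values.foldl (fun d v => d.insert v box) st.2))
    (PySem.Dict.empty, PySem.Dict.empty)
  (st.1.items.filter (fun p => p.2 == 1)).map
    (fun p => ((st.2.get? p.1).getD "", String.ofList [p.1]))

-- ===== PORT B =====
def get_only_choices_for_unit_alt (values : List (String × String)) (unit : List String) : List (String × String) :=
  let order := (unit.foldl
    (fun (acc : List Char × PySem.Set Char) box =>
      (((PySem.Dict.mk values).get? box).getD "").toList.foldl
        (fun acc c => if c ∈ acc.2 then acc else (acc.1 ++ [c], acc.2.add c)) acc)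
    ([], PySem.Set.empty)).1
  order.foldl
    (fun res c =>
      let st := unit.foldl
        (fun (st : Int × List String) box =>
          let k := (((PySem.Dict.mk values).get? box).getD "").toList.count c
          if k ≠ 0 then (st.1 + (k : Int), st.2 ++ [box]) else st)
        ((0 : Int), ([] : List String))
      if st.1 = 1 then res ++ [((PySem.List.pyGet? st.2 0).getD "", String.ofList [c])] else res)
    []

-- ===== PRECONDITION & SPEC =====
-- Pre_ : every box of the unit is a key of values (otherwise Python A raises KeyError at values[box]).
def Pre_get_only_choices_for_unit (values : List (String × String)) (unit : List String) : Prop :=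
  ∀ b ∈ unit, b ∈ values.map Prod.fst
instance (values : List (String × String)) (unit : List String) : Decidable (Pre_get_only_choices_for_unit values unit) := by unfold Pre_get_only_choices_for_unit; infer_instance
def pvWitness_get_only_choices_for_unit : (List (String × String)) × List String :=
  ([("A1", "12"), ("A2", "2"), ("A3", "23")], ["A1", "A2", "A3"])
def Spec_get_only_choices_for_unit (values : List (String × String)) (unit : List String) (out : List (String × String)) : Prop := out = get_only_choices_for_unit_alt values unit
instance (values : List (String × String)) (unit : List String) (out : List (String × String)) : Decidable (Spec_get_only_choices_for_unit values unit out) := by unfold Spec_get_only_choices_for_unit; infer_instance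

-- ===== CLAIM (what is proved, stated in full; the proofs are below) =====
def Claim_equal_get_only_choices_for_unit : Prop := ∀ (values : List (String × String)) (unit : List String), Dom_get_only_choices_for_unit values unit → Pre_get_only_choices_for_unit values unit → Spec_get_only_choices_for_unit values unit (get_only_choices_for_unit values unit)

-- ===== LEMMAS AND PROOFS =====
-- proof-side abbreviations: the looked-up characters of one box and the flattened
-- (character, box) streams both programs traverse
def pvLook (values : List (String × String)) (b : String) : List Char :=
  (((PySem.Dict.mk values).get? b).getD "").toList
def pvChars (values : List (String × String)) (unit : List String) : List Char :=
  unit.flatMap (pvLook values)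
def pvPairs (values : List (String × String)) (unit : List String) : List (Char × String) :=
  unit.flatMap (fun b => (pvLook values b).map (fun c => (c, b)))
def pvV2b (values : List (String × String)) (unit : List String) : PySem.Dict Char String :=
  (pvPairs values unit).foldl (fun d p => d.insert p.1 p.2) PySem.Dict.empty
def pvStep (values : List (String × String)) :
    PySem.Dict Char Int × PySem.Dict Char String → String → PySem.Dict Char Int × PySem.Dict Char String :=
  fun st box =>
    ((pvLook values box).foldl (fun d v => d.modify v 0 (fun n => n + 1)) st.1,
     (pvLook values box).foldl (fun d v => d.insert v box) st.2)

lemma A_closed (values : List (String × String)) (unit : List String) :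
    get_only_choices_for_unit values unit =
      ((PySem.Set.ofList (pvChars values unit)).filter
          (fun c => ((List.count c (pvChars values unit) : Int) == 1))).map
        (fun c => (((pvV2b values unit).get? c).getD "", String.ofList [c])) := by
  have hfold : unit.foldl (pvStep values) (PySem.Dict.empty, PySem.Dict.empty) =
      (PySem.Dict.counter (pvChars values unit), pvV2b values unit) := by
    unfold pvStep
    rw [PySem.List.foldl_prod_mk
      (f := fun (d : PySem.Dict Char Int) box => (pvLook values box).foldl (fun d v => d.modify v 0 (fun n => n + 1)) d)
      (g := fun (d : PySem.Dict Char String) box => (pvLook values box).foldl (fun d v => d.insert v box) d)]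
    rw [Prod.mk.injEq]
    constructor
    · rw [PySem.Dict.counter_eq_foldl, pvChars, List.foldl_flatMap]
    · rw [pvV2b, pvPairs, List.foldl_flatMap]
      congr 1
      funext d box
      rw [List.foldl_map]
  show (((unit.foldl (pvStep values) (PySem.Dict.empty, PySem.Dict.empty)).1.items.filter
      (fun p => p.2 == 1)).map
      (fun p => (((unit.foldl (pvStep values) (PySem.Dict.empty, PySem.Dict.empty)).2.get? p.1).getD "",
        String.ofList [p.1]))) = _
  rw [hfold]
  simp only [PySem.Dict.items_counter, List.filter_map, List.map_map]
  rfl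

def pvCnt (values : List (String × String)) (c : Char) (b : String) : Nat :=
  (pvLook values b).count c
def pvHits (values : List (String × String)) (unit : List String) (c : Char) : List String :=
  unit.filter (fun b => decide (pvCnt values c b ≠ 0))
def pvInner (values : List (String × String)) (unit : List String) (c : Char) : Int × List String :=
  unit.foldl
    (fun (st : Int × List String) box =>
      if pvCnt values c box ≠ 0 then (st.1 + (pvCnt values c box : Int), st.2 ++ [box]) else st)
    ((0 : Int), ([] : List String))

lemma order_inv (xs : List Char) : ∀ (s : PySem.Set Char),
    xs.foldl (fun (acc : List Char × PySem.Set Char) c =>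
      if c ∈ acc.2 then acc else (acc.1 ++ [c], acc.2.add c)) (s, s) =
    (xs.foldl PySem.Set.add s, xs.foldl PySem.Set.add s) := by
  induction xs with
  | nil => intro s; rfl
  | cons c xs ih =>
    intro s
    simp only [List.foldl_cons]
    by_cases h : c ∈ s
    · rw [if_pos h, PySem.Set.add_of_mem h, ih]
    · rw [if_neg h, PySem.Set.add_of_not_mem h, ih]

lemma inner_inv (values : List (String × String)) (c : Char) (u : List String) : ∀ (t : Int) (h : List String),
    u.foldl (fun (st : Int × List String) box =>
        if pvCnt values c box ≠ 0 then (st.1 + (pvCnt values c box : Int), st.2 ++ [box]) else st) (t, h) =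
      (t + ((u.map (pvCnt values c)).sum : Nat), h ++ u.filter (fun b => decide (pvCnt values c b ≠ 0))) := by
  induction u with
  | nil => intro t h; simp
  | cons b u ih =>
    intro t h
    simp only [List.foldl_cons, List.map_cons, List.sum_cons, List.filter_cons]
    by_cases hb : pvCnt values c b ≠ 0
    · rw [if_pos hb]
      rw [ih, Prod.mk.injEq]
      refine ⟨by push_cast; ring, by simp [hb]⟩
    · rw [if_neg hb]
      push Not at hb
      simp only [hb, ne_eq, decide_not, decide_true, Bool.not_true, ih, zero_add]
      simp

lemma B_closed (values : List (String × String)) (unit : List String) :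
    get_only_choices_for_unit_alt values unit =
      ((PySem.Set.ofList (pvChars values unit)).filter
          (fun c => decide ((((unit.map (pvCnt values c)).sum : Nat) : Int) = 1))).map
        (fun c => ((PySem.List.pyGet? (pvHits values unit c) 0).getD "", String.ofList [c])) := by
  have horder : (unit.foldl
      (fun (acc : List Char × PySem.Set Char) box =>
        (pvLook values box).foldl
          (fun acc c => if c ∈ acc.2 then acc else (acc.1 ++ [c], acc.2.add c)) acc)
      ([], PySem.Set.empty)).1 = PySem.Set.ofList (pvChars values unit) := by
    have : (unit.foldl
      (fun (acc : List Char × PySem.Set Char) box =>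
        (pvLook values box).foldl
          (fun acc c => if c ∈ acc.2 then acc else (acc.1 ++ [c], acc.2.add c)) acc)
      ([], PySem.Set.empty)) = ((pvChars values unit).foldl
        (fun (acc : List Char × PySem.Set Char) c =>
          if c ∈ acc.2 then acc else (acc.1 ++ [c], acc.2.add c)) ([], PySem.Set.empty)) := by
      rw [pvChars, List.foldl_flatMap]
    rw [this]
    have hempty : (PySem.Set.empty : PySem.Set Char) = [] := rfl
    rw [hempty, order_inv (pvChars values unit) [], PySem.Set.ofList_eq_foldl]
  show ((unit.foldl
      (fun (acc : List Char × PySem.Set Char) box =>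
        (pvLook values box).foldl
          (fun acc c => if c ∈ acc.2 then acc else (acc.1 ++ [c], acc.2.add c)) acc)
      ([], PySem.Set.empty)).1).foldl
    (fun res c =>
      if (pvInner values unit c).1 = 1 then
        res ++ [((PySem.List.pyGet? (pvInner values unit c).2 0).getD "", String.ofList [c])]
      else res) [] = _
  rw [horder]
  have hite : (fun (res : List (String × String)) c =>
      if (pvInner values unit c).1 = 1 then
        res ++ [((PySem.List.pyGet? (pvInner values unit c).2 0).getD "", String.ofList [c])]
      else res) = (fun res c =>
      if decide ((pvInner values unit c).1 = 1) = true then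
        res ++ [((PySem.List.pyGet? (pvInner values unit c).2 0).getD "", String.ofList [c])]
      else res) := by
    funext res c; simp only [decide_eq_true_eq]
  rw [hite, PySem.List.foldl_append_if (p := fun c => decide ((pvInner values unit c).1 = 1))
    (f := fun c => ((PySem.List.pyGet? (pvInner values unit c).2 0).getD "", String.ofList [c]))]
  simp only [List.nil_append]
  have hinner : ∀ c, pvInner values unit c =
      ((((unit.map (pvCnt values c)).sum : Nat) : Int), pvHits values unit c) := by
    intro c
    rw [pvInner, inner_inv]
    simp [pvHits]
  congr 1
  · funext c; rw [hinner]
  · apply List.filter_congr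
    intro c _
    rw [hinner]

lemma get?_foldl_insert (k : Char) : ∀ (P : List (Char × String)) (d : PySem.Dict Char String),
    ((P.foldl (fun d p => d.insert p.1 p.2) d).get? k) =
      ((P.filter (fun p => p.1 == k)).getLast?).elim (d.get? k) (fun p => some p.2) := by
  intro P
  induction P using List.reverseRecOn with
  | nil => intro d; simp
  | append_singleton P p ih =>
    intro d
    rw [List.foldl_append, List.foldl_cons, List.foldl_nil, PySem.Dict.get?_insert, List.filter_append]
    by_cases h : p.1 = k
    · simp [h]
    · have : (List.filter (fun p => p.1 == k) [p]) = [] := by simp [h]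
      rw [this, List.append_nil, if_neg (fun hh => h hh.symm), ih]

lemma sum_zero_aux {α β : Type} (f : α → Nat) (e : α → β) : ∀ (u : List α),
    (u.map f).sum = 0 →
      u.filter (fun b => decide (f b ≠ 0)) = [] ∧ u.flatMap (fun b => List.replicate (f b) (e b)) = [] := by
  intro u
  induction u with
  | nil => simp
  | cons b u ih =>
    intro h
    simp only [List.map_cons, List.sum_cons, Nat.add_eq_zero_iff] at h
    obtain ⟨h1, h2⟩ := h
    obtain ⟨ihf, ihm⟩ := ih h2
    constructor
    · rw [List.filter_cons_of_neg (by simp [h1]), ihf]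
    · rw [List.flatMap_cons, h1]
      simp [ihm]

lemma sum_one_aux {α β : Type} (f : α → Nat) (e : α → β) : ∀ (u : List α),
    (u.map f).sum = 1 →
      ∃ b0 : α, u.filter (fun b => decide (f b ≠ 0)) = [b0] ∧
        u.flatMap (fun b => List.replicate (f b) (e b)) = [e b0] := by
  intro u
  induction u with
  | nil => simp
  | cons b u ih =>
    intro h
    simp only [List.map_cons, List.sum_cons] at h
    rcases Nat.eq_zero_or_pos (f b) with hb | hb
    · rw [hb, Nat.zero_add] at h
      obtain ⟨b0, h1, h2⟩ := ih h
      refine ⟨b0, ?_, ?_⟩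
      · rw [List.filter_cons_of_neg (by simp [hb]), h1]
      · rw [List.flatMap_cons, hb]
        simp [h2]
    · have hb1 : f b = 1 := by omega
      have hrest : (u.map f).sum = 0 := by omega
      obtain ⟨h1, h2⟩ := sum_zero_aux f e u hrest
      refine ⟨b, ?_, ?_⟩
      · rw [List.filter_cons_of_pos (by simp [hb1]), h1]
      · rw [List.flatMap_cons, hb1, h2]
        rfl

lemma pairs_filter (values : List (String × String)) (unit : List String) (c : Char) :
    (pvPairs values unit).filter (fun p => p.1 == c) =
      unit.flatMap (fun b => List.replicate (pvCnt values c b) (c, b)) := by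
  rw [pvPairs, List.filter_flatMap]
  congr 1
  funext b
  rw [List.filter_map]
  have : ((fun (p : Char × String) => p.1 == c) ∘ fun x => (x, b)) = fun x => x == c := rfl
  rw [this]
  have : (pvLook values b).filter (fun x => x == c) = List.replicate (pvCnt values c b) c := by
    rw [pvCnt]
    have hfe : (fun (x : Char) => x == c) = fun x => decide (x = c) := by
      funext x; by_cases h : x = c <;> simp [h]
    rw [hfe, List.filter_eq]
  rw [this, List.map_replicate]

lemma int_beq_decide (a b : Int) : (a == b) = decide (a = b) := by
  by_cases h : a = b <;> simp [h]

lemma main_equal (values : List (String × String)) (unit : List String) :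
    get_only_choices_for_unit values unit = get_only_choices_for_unit_alt values unit := by
  rw [A_closed, B_closed]
  have hcount : ∀ c, List.count c (pvChars values unit) = (unit.map (pvCnt values c)).sum := by
    intro c
    rw [pvChars, List.count_flatMap]
    rfl
  have hfil : (PySem.Set.ofList (pvChars values unit)).filter
        (fun c => ((List.count c (pvChars values unit) : Int) == 1)) =
      (PySem.Set.ofList (pvChars values unit)).filter
        (fun c => decide ((((unit.map (pvCnt values c)).sum : Nat) : Int) = 1)) := by
    apply List.filter_congr
    intro c _
    rw [hcount c]
    exact int_beq_decide _ _
  rw [hfil]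
  apply List.map_congr_left
  intro c hc
  have hmem := (List.mem_filter.mp hc).2
  simp only [decide_eq_true_eq] at hmem
  have hsum : (unit.map (pvCnt values c)).sum = 1 := by exact_mod_cast hmem
  obtain ⟨b0, hfilr, hflat⟩ := sum_one_aux (pvCnt values c) (fun b => ((c : Char), b)) unit hsum
  have hv2b : (pvV2b values unit).get? c = some b0 := by
    rw [pvV2b, get?_foldl_insert, pairs_filter, hflat]
    rfl
  have hhits : pvHits values unit c = [b0] := by rw [pvHits, hfilr]
  rw [hv2b, hhits]
  rfl

-- ===== VERDICT (by name: the statement is the Claim_ definition above) =====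
theorem get_only_choices_for_unit_spec : Claim_equal_get_only_choices_for_unit := by
  intro values unit _ _
  unfold Spec_get_only_choices_for_unit
  exact main_equal values unit
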